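-- pv_equiv track=rewrite | github.com/vfo018/project-intact | kafka/deploy/app/stix_mitigator.py | pick_safest_countermeasure
-- ===== SOURCE A (Python) =====
-- CM_METRICS = {
--     "UC1.1": {
--         "C14": {"time": 7, "energy": 5, "cost": 5, "rf": 9},
--         "C15": {"time": 9, "energy": 4, "cost": 6, "rf": 9},
--         "C16": {"time": 10, "energy": 8, "cost": 9, "rf": 9},
--         "C18": {"time": 10, "energy": 10, "cost": 10, "rf": 9},
--     },
--     "UC1.2": {
--         "C14": {"time": 6, "energy": 5, "cost": 5, "rf": 9},
--         "C15": {"time": 4, "energy": 4, "cost": 6, "rf": 9},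
--         "C16": {"time": 10, "energy": 8, "cost": 9, "rf": 9},
--         "C17": {"time": 10, "energy": 10, "cost": 10, "rf": 9},
--         "C18": {"time": 4, "energy": 10, "cost": 10, "rf": 9},
--     },
--     "UC1.3": {
--         "C14": {"time": 3, "energy": 5, "cost": 5, "rf": 9},
--         "C15": {"time": 10, "energy": 4, "cost": 6, "rf": 9},
--         "C16": {"time": 10, "energy": 8, "cost": 9, "rf": 9},
--         "C17": {"time": 4, "energy": 10, "cost": 10, "rf": 9},
--         "C18": {"time": 4, "energy": 10, "cost": 10, "rf": 9},
--     },
-- }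
--
-- def pick_safest_countermeasure(uc: str):
--     candidates = CM_METRICS.get(uc)
--     if not candidates:
--         # conservative fallback
--         return "C14", {"time": None, "energy": None, "cost": None, "rf": None}
--
--     items = []
--     for cm_id, m in candidates.items():
--         score = (m["rf"], -(m["time"] + m["energy"] + m["cost"]))  # max rf, min sum
--         items.append((score, cm_id, m))
--     items.sort(reverse=True)
--     _, best_id, best_m = items[0]
--     return best_id, best_m
-- ===== SOURCE B (Python) =====
-- CM_METRICS = {
--     "UC1.1": {
--         "C14": {"time": 7, "energy": 5, "cost": 5, "rf": 9},
--         "C15": {"time": 9, "energy": 4, "cost": 6, "rf": 9},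
--         "C16": {"time": 10, "energy": 8, "cost": 9, "rf": 9},
--         "C18": {"time": 10, "energy": 10, "cost": 10, "rf": 9},
--     },
--     "UC1.2": {
--         "C14": {"time": 6, "energy": 5, "cost": 5, "rf": 9},
--         "C15": {"time": 4, "energy": 4, "cost": 6, "rf": 9},
--         "C16": {"time": 10, "energy": 8, "cost": 9, "rf": 9},
--         "C17": {"time": 10, "energy": 10, "cost": 10, "rf": 9},
--         "C18": {"time": 4, "energy": 10, "cost": 10, "rf": 9},
--     },
--     "UC1.3": {
--         "C14": {"time": 3, "energy": 5, "cost": 5, "rf": 9},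
--         "C15": {"time": 10, "energy": 4, "cost": 6, "rf": 9},
--         "C16": {"time": 10, "energy": 8, "cost": 9, "rf": 9},
--         "C17": {"time": 4, "energy": 10, "cost": 10, "rf": 9},
--         "C18": {"time": 4, "energy": 10, "cost": 10, "rf": 9},
--     },
-- }
--
-- def pick_safest_countermeasure(uc: str):
--     candidates = CM_METRICS.get(uc)
--     if not candidates:
--         # conservative fallback
--         return "C14", {"time": None, "energy": None, "cost": None, "rf": None}
--     # single selection pass: max rf, then min metric sum, then largest id
--     best_id, best_m = max(
--         candidates.items(),
--         key=lambda kv: (kv[1]["rf"],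
--                         -(kv[1]["time"] + kv[1]["energy"] + kv[1]["cost"]),
--                         kv[0]),
--     )
--     return best_id, best_m
-- ===== Notes on version B (the rewrite author's own statement) =====
-- stated objective: simpler
-- what changed: The list-build + full reverse sort + take-first is replaced by a single max() selection pass over candidates.items() with a (rf, -sum, id) key; no intermediate list is built or sorted.
import Mathlib
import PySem

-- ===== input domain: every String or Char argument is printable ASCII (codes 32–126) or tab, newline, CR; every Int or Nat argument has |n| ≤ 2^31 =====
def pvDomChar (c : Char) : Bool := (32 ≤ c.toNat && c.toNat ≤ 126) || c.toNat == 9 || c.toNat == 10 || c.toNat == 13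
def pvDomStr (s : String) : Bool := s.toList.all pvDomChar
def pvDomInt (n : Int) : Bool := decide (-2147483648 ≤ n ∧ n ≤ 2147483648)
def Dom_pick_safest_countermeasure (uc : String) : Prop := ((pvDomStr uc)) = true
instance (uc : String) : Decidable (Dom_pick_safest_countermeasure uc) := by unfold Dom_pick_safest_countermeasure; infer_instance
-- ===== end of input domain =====

-- B replaces A's build-list + reverse-sort + take-first with a single max-selection pass (simpler, no intermediate sorted list).

-- Shared module-level data CM_METRICS (keys are distinct, so Dict.mk is the dict literal exactly).
def pvM (t e c r : Int) : PySem.Dict String Int :=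
  PySem.Dict.mk [("time", t), ("energy", e), ("cost", c), ("rf", r)]

def cmMetrics : PySem.Dict String (PySem.Dict String (PySem.Dict String Int)) :=
  PySem.Dict.mk
    [ ("UC1.1", (PySem.Dict.mk [("C14", pvM 7 5 5 9), ("C15", pvM 9 4 6 9), ("C16", pvM 10 8 9 9), ("C18", pvM 10 10 10 9)] : PySem.Dict String (PySem.Dict String Int)))
    , ("UC1.2", (PySem.Dict.mk [("C14", pvM 6 5 5 9), ("C15", pvM 4 4 6 9), ("C16", pvM 10 8 9 9), ("C17", pvM 10 10 10 9), ("C18", pvM 4 10 10 9)] : PySem.Dict String (PySem.Dict String Int)))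
    , ("UC1.3", (PySem.Dict.mk [("C14", pvM 3 5 5 9), ("C15", pvM 10 4 6 9), ("C16", pvM 10 8 9 9), ("C17", pvM 4 10 10 9), ("C18", pvM 4 10 10 9)] : PySem.Dict String (PySem.Dict String Int))) ]

-- the shared fallback literal "C14", {"time": None, ...}
def pvFallback : String × (List (String × Option Int)) :=
  ("C14", [("time", none), ("energy", none), ("cost", none), ("rf", none)])

-- m[k]; every key looked up is present in the fixed table, so the KeyError branch is unreachable
def pvGetM (m : PySem.Dict String Int) (k : String) : Int := m.getD k 0

-- ===== PORT A =====
-- descending lexicographic '>' on the triples ((rf, -sum), cm_id, m); the dicts m are never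
-- compared because cm_ids are distinct (Python's tuple comparison never reaches them) — exact here.
def pvItemGt (a b : (Int × Int) × String × PySem.Dict String Int) : Bool :=
  decide (b.1.1 < a.1.1) ||
    (a.1.1 == b.1.1 && (decide (b.1.2 < a.1.2) || (a.1.2 == b.1.2 && decide (b.2.1 < a.2.1))))

-- stable descending insertion (hand port of list.sort(reverse=True); exact: ties keep order, and no ties occur)
def pvDescInsert (x : (Int × Int) × String × PySem.Dict String Int) :
    List ((Int × Int) × String × PySem.Dict String Int) →
    List ((Int × Int) × String × PySem.Dict String Int)
  | [] => [x]
  | y :: ys => if pvItemGt x y then x :: y :: ys else y :: pvDescInsert x ys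

def pick_safest_countermeasure (uc : String) : String × (List (String × Option Int)) :=
  match cmMetrics.get? uc with
  | none => pvFallback
  | some candidates =>
    if candidates.items.isEmpty then pvFallback
    else
      let items := candidates.items.map (fun p =>
        ((pvGetM p.2 "rf", -(pvGetM p.2 "time" + pvGetM p.2 "energy" + pvGetM p.2 "cost")), p.1, p.2))
      match items.foldl (fun acc x => pvDescInsert x acc) [] with
      | [] => pvFallback  -- unreachable (items nonempty); totality guard for items[0]
      | best :: _ => (best.2.1, best.2.2.items.map (fun q => (q.1, some q.2)))

-- ===== PORT B =====
-- lexicographic '>' on the max-key (rf, -(time+energy+cost), cm_id)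
def pvKeyGt (a b : String × PySem.Dict String Int) : Bool :=
  decide (pvGetM b.2 "rf" < pvGetM a.2 "rf") ||
    (pvGetM a.2 "rf" == pvGetM b.2 "rf" &&
      (decide (pvGetM a.2 "time" + pvGetM a.2 "energy" + pvGetM a.2 "cost"
               < pvGetM b.2 "time" + pvGetM b.2 "energy" + pvGetM b.2 "cost") ||
       (pvGetM a.2 "time" + pvGetM a.2 "energy" + pvGetM a.2 "cost"
          == pvGetM b.2 "time" + pvGetM b.2 "energy" + pvGetM b.2 "cost" &&
        decide (b.1 < a.1))))

def pick_safest_countermeasure_alt (uc : String) : String × (List (String × Option Int)) :=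
  match cmMetrics.get? uc with
  | none => pvFallback
  | some candidates =>
    match candidates.items with
    | [] => pvFallback
    | x :: rest =>  -- max(candidates.items(), key=...): running max, first maximum kept on a tie
      let best := rest.foldl (fun b kv => if pvKeyGt kv b then kv else b) x
      (best.1, best.2.items.map (fun q => (q.1, some q.2)))

-- ===== PRECONDITION & SPEC =====
def Spec_pick_safest_countermeasure (uc : String) (out : String × (List (String × Option Int))) : Prop := out = pick_safest_countermeasure_alt uc
instance (uc : String) (out : String × (List (String × Option Int))) : Decidable (Spec_pick_safest_countermeasure uc out) := by unfold Spec_pick_safest_countermeasure; infer_instance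

-- ===== CLAIM (what is proved, stated in full; the proofs are below) =====
def Claim_equal_pick_safest_countermeasure : Prop := ∀ (uc : String), Dom_pick_safest_countermeasure uc → Spec_pick_safest_countermeasure uc (pick_safest_countermeasure uc)

-- ===== LEMMAS AND PROOFS =====
theorem pv_get_none (uc : String) (h1 : uc ≠ "UC1.1") (h2 : uc ≠ "UC1.2") (h3 : uc ≠ "UC1.3") :
    cmMetrics.get? uc = none := by
  simp [cmMetrics, PySem.Dict.get?]
  exact ⟨fun h => h1 h.symm, fun h => h2 h.symm, fun h => h3 h.symm⟩

-- ===== VERDICT (by name: the statement is the Claim_ definition above) =====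
theorem pick_safest_countermeasure_spec : Claim_equal_pick_safest_countermeasure := by
  intro uc _
  unfold Spec_pick_safest_countermeasure
  by_cases h1 : uc = "UC1.1"
  · subst h1; decide
  by_cases h2 : uc = "UC1.2"
  · subst h2; decide
  by_cases h3 : uc = "UC1.3"
  · subst h3; decide
  unfold pick_safest_countermeasure pick_safest_countermeasure_alt
  rw [pv_get_none uc h1 h2 h3]
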